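-- pv_equiv track=rewrite | github.com/wojmichaluk/ASD-2022-2023 | offline/zad8/zad8.py | get_spills
-- ===== SOURCE A (Python) =====
-- from collections import deque
--
-- def get_spills(M):
--     n=len(M)
--     m=len(M[0])
--     vis=[[0 for _ in range(m)] for _ in range(n)]
--     q=deque()
--     spills=[]
--     for i in range(m):
--         if not vis[0][i] and M[0][i]:
--             vis[0][i]=1
--             q.append((0,i))
--             curr_spill=M[0][i]
--             while q:
--                 x,y=q.pop()
--                 curr_spill+=try_moving_to(x-1,y,n,m,vis,M,q)
--                 curr_spill+=try_moving_to(x+1,y,n,m,vis,M,q)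
--                 curr_spill+=try_moving_to(x,y-1,n,m,vis,M,q)
--                 curr_spill+=try_moving_to(x,y+1,n,m,vis,M,q)
--             spills.append((i,curr_spill))
--     return spills
--
-- def try_moving_to(x,y,n,m,vis,M,q):
--     if 0<=x<n and 0<=y<m and not vis[x][y] and M[x][y]:
--         vis[x][y]=1
--         q.append((x,y))
--         return M[x][y]
--     return 0
-- ===== SOURCE B (Python) =====
-- def get_spills(M):
--     n = len(M)
--     m = len(M[0])
--     vis = [[0] * m for _ in range(n)]
--     spills = []
--     for i in range(m):
--         if not vis[0][i] and M[0][i]: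
--             vis[0][i] = 1
--             total = 0
--             frontier = [(0, i)]
--             while frontier:
--                 nxt = []
--                 for x, y in frontier:
--                     total += M[x][y]
--                     for a, b in ((x - 1, y), (x + 1, y), (x, y - 1), (x, y + 1)):
--                         if 0 <= a < n and 0 <= b < m and not vis[a][b] and M[a][b]:
--                             vis[a][b] = 1
--                             nxt.append((a, b))
--                 frontier = nxt
--             spills.append((i, total))
--     return spills
-- ===== Notes on version B (the rewrite author's own statement) =====
-- stated objective: alternative
-- what changed: Replaced the explicit deque used as a LIFO stack (pop one cell, push unvisited neighbours, add values at push time) by a level-synchronous frontier BFS (process the whole frontier, add each cell's value when it is processed, collect the next frontier in a fresh list).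
-- outside the precondition, e.g. on get_spills([[0], []]): A returns [], B returns []
import Mathlib
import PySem

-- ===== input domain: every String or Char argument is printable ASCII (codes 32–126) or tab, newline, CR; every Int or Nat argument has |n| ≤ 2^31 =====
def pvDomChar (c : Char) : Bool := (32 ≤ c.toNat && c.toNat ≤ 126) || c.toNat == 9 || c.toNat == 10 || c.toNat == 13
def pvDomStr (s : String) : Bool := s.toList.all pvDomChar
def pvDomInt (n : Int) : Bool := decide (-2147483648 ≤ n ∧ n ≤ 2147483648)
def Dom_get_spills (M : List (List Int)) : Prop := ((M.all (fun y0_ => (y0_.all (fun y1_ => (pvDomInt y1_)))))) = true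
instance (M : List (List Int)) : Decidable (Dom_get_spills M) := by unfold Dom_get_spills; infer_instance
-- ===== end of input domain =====

-- B replaces A's LIFO stack flood fill (values added at push time) by a level-synchronous
-- frontier BFS (values added when a frontier cell is processed); same return value.

-- ===== PORT A =====
-- Python's deque is used purely as a LIFO stack (append/pop); ported as a list with
-- push = cons and pop = head, which is the same LIFO discipline.
def tryMovingTo (x y : Int) (n m : Nat) (vis : List (List Int)) (M : List (List Int))
    (q : List (Int × Int)) : Int × List (List Int) × List (Int × Int) :=
  if 0 ≤ x ∧ x < (n : Int) ∧ 0 ≤ y ∧ y < (m : Int) ∧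
      (vis.getD x.toNat []).getD y.toNat 0 = 0 ∧ (M.getD x.toNat []).getD y.toNat 0 ≠ 0 then
    ((M.getD x.toNat []).getD y.toNat 0,
     vis.set x.toNat ((vis.getD x.toNat []).set y.toNat 1),
     (x, y) :: q)
  else (0, vis, q)

-- the 'while q:' loop; fuel only makes the recursion structural (it is never exhausted)
def spillLoop : Nat → Nat → Nat → List (List Int) → List (Int × Int) → List (List Int) → Int →
    Int × List (List Int)
  | 0, _, _, _, _, vis, curr => (curr, vis)
  | fuel + 1, n, m, M, q, vis, curr =>
    match q with
    | [] => (curr, vis)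
    | (x, y) :: rest =>
      let r1 := tryMovingTo (x - 1) y n m vis M rest
      let r2 := tryMovingTo (x + 1) y n m r1.2.1 M r1.2.2
      let r3 := tryMovingTo x (y - 1) n m r2.2.1 M r2.2.2
      let r4 := tryMovingTo x (y + 1) n m r3.2.1 M r3.2.2
      spillLoop fuel n m M r4.2.2 r4.2.1 (curr + r1.1 + r2.1 + r3.1 + r4.1)

def outerStepA (n m : Nat) (M : List (List Int))
    (st : List (List Int) × List (Int × Int)) (i : Nat) :
    List (List Int) × List (Int × Int) :=
  if (st.1.getD 0 []).getD i 0 = 0 ∧ (M.getD 0 []).getD i 0 ≠ 0 then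
    let vis1 := st.1.set 0 ((st.1.getD 0 []).set i 1)
    let r := spillLoop (5 * (n * m) + 2) n m M [((0 : Int), (i : Int))] vis1
      ((M.getD 0 []).getD i 0)
    (r.2, st.2 ++ [((i : Int), r.1)])
  else st

def get_spills (M : List (List Int)) : List (Int × Int) :=
  let n := M.length
  let m := (M.headD []).length
  let vis0 := (List.range n).map (fun _ => (List.range m).map (fun _ => (0 : Int)))
  ((List.range m).foldl (outerStepA n m M) (vis0, [])).2

-- ===== PORT B =====
def tryNeighbor (n m : Nat) (M : List (List Int))
    (st : List (List Int) × List (Int × Int)) (p : Int × Int) :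
    List (List Int) × List (Int × Int) :=
  if 0 ≤ p.1 ∧ p.1 < (n : Int) ∧ 0 ≤ p.2 ∧ p.2 < (m : Int) ∧
      (st.1.getD p.1.toNat []).getD p.2.toNat 0 = 0 ∧
      (M.getD p.1.toNat []).getD p.2.toNat 0 ≠ 0 then
    (st.1.set p.1.toNat ((st.1.getD p.1.toNat []).set p.2.toNat 1), st.2 ++ [p])
  else st

def procCell (n m : Nat) (M : List (List Int))
    (st : Int × List (List Int) × List (Int × Int)) (c : Int × Int) :
    Int × List (List Int) × List (Int × Int) :=
  let t := st.1 + (M.getD c.1.toNat []).getD c.2.toNat 0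
  let vn := [(c.1 - 1, c.2), (c.1 + 1, c.2), (c.1, c.2 - 1), (c.1, c.2 + 1)].foldl
    (tryNeighbor n m M) (st.2.1, st.2.2)
  (t, vn.1, vn.2)

-- the 'while frontier:' loop; fuel only makes the recursion structural (never exhausted)
def levelLoop : Nat → Nat → Nat → List (List Int) → List (Int × Int) → List (List Int) → Int →
    Int × List (List Int)
  | 0, _, _, _, _, vis, total => (total, vis)
  | fuel + 1, n, m, M, frontier, vis, total =>
    if frontier.isEmpty then (total, vis)
    else
      let r := frontier.foldl (procCell n m M) (total, vis, ([] : List (Int × Int)))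
      levelLoop fuel n m M r.2.2 r.2.1 r.1

def outerStepB (n m : Nat) (M : List (List Int))
    (st : List (List Int) × List (Int × Int)) (i : Nat) :
    List (List Int) × List (Int × Int) :=
  if (st.1.getD 0 []).getD i 0 = 0 ∧ (M.getD 0 []).getD i 0 ≠ 0 then
    let vis1 := st.1.set 0 ((st.1.getD 0 []).set i 1)
    let r := levelLoop (n * m + 2) n m M [((0 : Int), (i : Int))] vis1 0
    (r.2, st.2 ++ [((i : Int), r.1)])
  else st

def get_spills_alt (M : List (List Int)) : List (Int × Int) :=
  let n := M.length
  let m := (M.headD []).length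
  let vis0 := (List.range n).map (fun _ => (List.range m).map (fun _ => (0 : Int)))
  ((List.range m).foldl (outerStepB n m M) (vis0, [])).2

-- ===== PRECONDITION & SPEC =====
-- Pre_ excludes the empty list (A raises IndexError on len(M[0])) and grids with a row
-- shorter than the first row, on which A raises IndexError whenever the flood fill reaches
-- a missing cell (B raises there too); this shape condition is conservative: on a few
-- ragged grids the fill never reaches a short row and both A and B return the same value.
def Pre_get_spills (M : List (List Int)) : Prop :=
  M ≠ [] ∧ ∀ row ∈ M, (M.headD []).length ≤ row.length
instance (M : List (List Int)) : Decidable (Pre_get_spills M) := by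
  unfold Pre_get_spills; infer_instance

def pvWitness_get_spills : List (List Int) := [[1, 0, 2], [0, 3, 0]]

def Spec_get_spills (M : List (List Int)) (out : List (Int × Int)) : Prop := out = get_spills_alt M
instance (M : List (List Int)) (out : List (Int × Int)) : Decidable (Spec_get_spills M out) := by
  unfold Spec_get_spills; infer_instance

-- ===== CLAIM (what is proved, stated in full; the proofs are below) =====
def Claim_equal_get_spills : Prop :=
  ∀ (M : List (List Int)), Dom_get_spills M → Pre_get_spills M → Spec_get_spills M (get_spills M)

-- ===== LEMMAS AND PROOFS =====

-- cells, cell values, adjacency, components (proof-side only)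
def castC (c : Nat × Nat) : Int × Int := ((c.1 : Int), (c.2 : Int))

def valC (M : List (List Int)) (c : Nat × Nat) : Int := (M.getD c.1 []).getD c.2 0

def goodC (M : List (List Int)) (n m : Nat) (c : Nat × Nat) : Prop :=
  c.1 < n ∧ c.2 < m ∧ valC M c ≠ 0

def adjC (c d : Nat × Nat) : Prop :=
  (c.1 = d.1 ∧ (c.2 = d.2 + 1 ∨ d.2 = c.2 + 1)) ∨
  (c.2 = d.2 ∧ (c.1 = d.1 + 1 ∨ d.1 = c.1 + 1))

def gridF (n m : Nat) : Finset (Nat × Nat) := Finset.range n ×ˢ Finset.range m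

def inComp (M : List (List Int)) (n m : Nat) (V0 : Finset (Nat × Nat)) (s d : Nat × Nat) : Prop :=
  goodC M n m d ∧ d ∉ V0 ∧
    Relation.ReflTransGen (fun u v => adjC u v ∧ goodC M n m v ∧ v ∉ V0) s d

noncomputable def compF (M : List (List Int)) (n m : Nat) (V0 : Finset (Nat × Nat))
    (s : Nat × Nat) : Finset (Nat × Nat) :=
  @Finset.filter _ (inComp M n m V0 s) (fun _ => Classical.propDecidable _) (gridF n m)

-- vis-list ↔ visited-set representation
def VRepr (n m : Nat) (vis : List (List Int)) (V : Finset (Nat × Nat)) : Prop :=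
  vis.length = n ∧ (∀ r ∈ vis, r.length = m) ∧
  ∀ x y, x < n → y < m → (vis.getD x []).getD y 0 = (if (x, y) ∈ V then 1 else 0)

theorem VRepr_ext {n m : Nat} {v1 v2 : List (List Int)} {V : Finset (Nat × Nat)}
    (h1 : VRepr n m v1 V) (h2 : VRepr n m v2 V) : v1 = v2 := by
  obtain ⟨l1, r1, e1⟩ := h1
  obtain ⟨l2, r2, e2⟩ := h2
  apply List.ext_getElem (l1.trans l2.symm)
  intro x hx1 hx2
  have hxn : x < n := by omega
  have hr1 : v1[x].length = m := r1 _ (List.getElem_mem hx1)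
  have hr2 : v2[x].length = m := r2 _ (List.getElem_mem hx2)
  apply List.ext_getElem (hr1.trans hr2.symm)
  intro y hy1 hy2
  have hym : y < m := by omega
  have g1 := e1 x y hxn hym
  have g2 := e2 x y hxn hym
  rw [List.getD_eq_getElem _ _ hx1, List.getD_eq_getElem _ _ hy1] at g1
  rw [List.getD_eq_getElem _ _ hx2, List.getD_eq_getElem _ _ hy2] at g2
  rw [g1, g2]

theorem VRepr_set {n m : Nat} {vis : List (List Int)} {V : Finset (Nat × Nat)}
    {a b : Nat} (h : VRepr n m vis V) (ha : a < n) (hb : b < m) :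
    VRepr n m (vis.set a ((vis.getD a []).set b 1)) (insert (a, b) V) := by
  obtain ⟨hl, hr, he⟩ := h
  have haL : a < vis.length := by omega
  have hrowlen : (vis.getD a []).length = m := by
    rw [List.getD_eq_getElem _ _ haL]; exact hr _ (List.getElem_mem haL)
  refine ⟨by simpa using hl, ?_, ?_⟩
  · intro r hrm
    rcases List.mem_or_eq_of_mem_set hrm with h' | h'
    · exact hr _ h'
    · rw [h']; simpa using hrowlen
  · intro x y hx hy
    by_cases hxa : x = a
    · subst hxa
      have houter : (vis.set x ((vis.getD x []).set b 1)).getD x [] = (vis.getD x []).set b 1 := by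
        rw [List.getD_eq_getElem _ _ (by simpa using haL)]
        simp
      rw [houter]
      by_cases hyb : y = b
      · subst hyb
        rw [List.getD_eq_getElem _ _ (by rw [List.length_set]; omega)]
        simp
      · rw [List.getD_eq_getElem?_getD, List.getElem?_set_ne (by omega),
          ← List.getD_eq_getElem?_getD, he x y hx hy]
        have : ((x, y) ∈ insert (x, b) V) ↔ ((x, y) ∈ V) := by
          simp [Finset.mem_insert, hyb]
        simp only [this]
    · have houter : (vis.set a ((vis.getD a []).set b 1)).getD x [] = vis.getD x [] := by
        simp [List.getD_eq_getElem?_getD, List.getElem?_set_ne (show a ≠ x from fun h => hxa h.symm)]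
      rw [houter, he x y hx hy]
      have : ((x, y) ∈ insert (a, b) V) ↔ ((x, y) ∈ V) := by
        simp [Finset.mem_insert, Prod.ext_iff, hxa]
      simp only [this]

theorem VRepr_get {n m : Nat} {vis : List (List Int)} {V : Finset (Nat × Nat)}
    {a b : Nat} (h : VRepr n m vis V) (ha : a < n) (hb : b < m) :
    ((vis.getD a []).getD b 0 = 0 ↔ (a, b) ∉ V) := by
  rw [h.2.2 a b ha hb]
  split <;> simp_all

theorem VRepr_init (n m : Nat) :
    VRepr n m ((List.range n).map (fun _ => (List.range m).map (fun _ => (0 : Int)))) ∅ := by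
  refine ⟨by simp, ?_, ?_⟩
  · intro r hr
    rw [List.mem_map] at hr
    obtain ⟨a, _, rfl⟩ := hr
    simp
  · intro x y hx hy
    have h0 : ((List.range n).map (fun _ => (List.range m).map (fun _ => (0 : Int)))).getD x []
        = (List.range m).map (fun _ => (0 : Int)) := by
      rw [List.getD_eq_getElem _ _ (by simpa using hx)]
      simp
    rw [h0, List.getD_eq_getElem _ _ (by simpa using hy)]
    simp

-- accumulator invariant for the four neighbour tries of one cell
def AccInv (M : List (List Int)) (n m : Nat) (V : Finset (Nat × Nat)) (u : Nat × Nat)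
    (new : List (Nat × Nat)) (vis : List (List Int)) : Prop :=
  VRepr n m vis (V ∪ new.toFinset) ∧ new.Nodup ∧
  ∀ c ∈ new, adjC u c ∧ goodC M n m c ∧ c ∉ V

-- one tryMovingTo call, relative to the accumulator invariant
theorem castC_inj {c d : Nat × Nat} (h : castC c = castC d) : c = d := by
  simp only [castC, Prod.ext_iff] at h ⊢
  omega

theorem try_acc (M : List (List Int)) (n m : Nat) (V : Finset (Nat × Nat)) (u : Nat × Nat)
    (new : List (Nat × Nat)) (vis : List (List Int)) (rest : List (Int × Int)) (p : Int × Int)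
    (hadj : ∀ c : Nat × Nat, castC c = p → adjC u c)
    (hinv : AccInv M n m V u new vis) :
    ∃ new' vis',
      tryMovingTo p.1 p.2 n m vis M ((new.reverse.map castC) ++ rest) =
        (((new'.map (valC M)).sum - (new.map (valC M)).sum), vis',
          (new'.reverse.map castC) ++ rest) ∧
      AccInv M n m V u new' vis' ∧ new <+: new' ∧
      (∀ c : Nat × Nat, castC c = p → goodC M n m c → c ∉ V → c ∈ new') := by
  obtain ⟨hrepr, hnd, hprops⟩ := hinv
  by_cases hc : 0 ≤ p.1 ∧ p.1 < (n : Int) ∧ 0 ≤ p.2 ∧ p.2 < (m : Int) ∧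
      (vis.getD p.1.toNat []).getD p.2.toNat 0 = 0 ∧ (M.getD p.1.toNat []).getD p.2.toNat 0 ≠ 0
  · set c : Nat × Nat := (p.1.toNat, p.2.toNat) with hcdef
    have hcast : castC c = p := by
      simp only [castC, hcdef]
      exact Prod.ext (by omega) (by omega)
    have hc1 : c.1 < n := by show p.1.toNat < n; omega
    have hc2 : c.2 < m := by show p.2.toNat < m; omega
    have hgood : goodC M n m c := ⟨hc1, hc2, hc.2.2.2.2.2⟩
    have hnotin : c ∉ V ∪ new.toFinset := (VRepr_get hrepr hc1 hc2).mp hc.2.2.2.2.1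
    have hcV : c ∉ V := fun h => hnotin (Finset.mem_union_left _ h)
    have hcnew : c ∉ new := fun h => hnotin (Finset.mem_union_right _ (List.mem_toFinset.mpr h))
    have hpp : castC c = (p.1, p.2) := by
      refine Prod.ext ?_ ?_ <;> simp [castC, hcdef] <;> omega
    refine ⟨new ++ [c],
      vis.set p.1.toNat ((vis.getD p.1.toNat []).set p.2.toNat 1), ?_, ⟨?_, ?_, ?_⟩, ?_, ?_⟩
    · have hv : valC M c = (M.getD p.1.toNat []).getD p.2.toNat 0 := by simp [valC, hcdef]
      have e1 : (M.getD p.1.toNat []).getD p.2.toNat 0 =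
          ((new ++ [c]).map (valC M)).sum - (new.map (valC M)).sum := by
        simp only [List.map_append, List.sum_append, List.map_cons, List.map_nil,
          List.sum_cons, List.sum_nil, hv]
        ring
      have e3 : ((p.1, p.2) : Int × Int) :: (new.reverse.map castC ++ rest) =
          ((new ++ [c]).reverse.map castC) ++ rest := by
        simp [List.reverse_append, hpp]
      rw [tryMovingTo, if_pos hc]
      exact Prod.ext e1 (Prod.ext rfl e3)
    · have : V ∪ (new ++ [c]).toFinset = insert c (V ∪ new.toFinset) := by
        ext d
        simp only [Finset.mem_union, List.mem_toFinset, List.mem_append, List.mem_singleton,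
          Finset.mem_insert]
        tauto
      rw [this]
      exact VRepr_set hrepr hc1 hc2
    · refine List.Nodup.append hnd (List.nodup_singleton c) ?_
      intro a ha hb
      simp only [List.mem_singleton] at hb
      subst hb
      exact hcnew ha
    · intro d hd
      rcases List.mem_append.mp hd with h | h
      · exact hprops d h
      · simp at h; subst h; exact ⟨hadj c hcast, hgood, hcV⟩
    · exact ⟨[c], rfl⟩
    · intro d hdp _ _
      have : d = c := castC_inj (hdp.trans hcast.symm)
      simp [this]
  · refine ⟨new, vis, ?_, ⟨hrepr, hnd, hprops⟩, List.prefix_refl _, ?_⟩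
    · rw [tryMovingTo, if_neg hc]
      simp
    · intro d hdp hdg hdV
      by_contra hdnew
      obtain ⟨hg1, hg2, hg3⟩ := hdg
      apply hc
      have h1 : p.1 = (d.1 : Int) := by rw [← hdp]; rfl
      have h2 : p.2 = (d.2 : Int) := by rw [← hdp]; rfl
      have ht1 : p.1.toNat = d.1 := by omega
      have ht2 : p.2.toNat = d.2 := by omega
      have hdin : (d.1, d.2) ∉ V ∪ new.toFinset := by
        simp only [Finset.mem_union, List.mem_toFinset]
        rintro (h | h)
        · exact hdV (by simpa using h)
        · exact hdnew (by simpa using h)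
      refine ⟨by omega, by omega, by omega, by omega, ?_, ?_⟩
      · rw [ht1, ht2]
        exact (VRepr_get hrepr hg1 hg2).mpr hdin
      · rw [ht1, ht2]
        exact hg3

-- same for B's tryNeighbor (append-at-end next-frontier)
theorem tryN_acc (M : List (List Int)) (n m : Nat) (V : Finset (Nat × Nat)) (u : Nat × Nat)
    (new : List (Nat × Nat)) (vis : List (List Int)) (acc : List (Int × Int)) (p : Int × Int)
    (hadj : ∀ c : Nat × Nat, castC c = p → adjC u c)
    (hinv : AccInv M n m V u new vis) :
    ∃ new' vis',
      tryNeighbor n m M (vis, acc ++ new.map castC) p =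
        (vis', acc ++ new'.map castC) ∧
      AccInv M n m V u new' vis' ∧ new <+: new' ∧
      (∀ c : Nat × Nat, castC c = p → goodC M n m c → c ∉ V → c ∈ new') := by
  obtain ⟨hrepr, hnd, hprops⟩ := hinv
  by_cases hc : 0 ≤ p.1 ∧ p.1 < (n : Int) ∧ 0 ≤ p.2 ∧ p.2 < (m : Int) ∧
      (vis.getD p.1.toNat []).getD p.2.toNat 0 = 0 ∧ (M.getD p.1.toNat []).getD p.2.toNat 0 ≠ 0
  · set c : Nat × Nat := (p.1.toNat, p.2.toNat) with hcdef
    have hcast : castC c = p := by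
      simp only [castC, hcdef]
      exact Prod.ext (by omega) (by omega)
    have hc1 : c.1 < n := by show p.1.toNat < n; omega
    have hc2 : c.2 < m := by show p.2.toNat < m; omega
    have hgood : goodC M n m c := ⟨hc1, hc2, hc.2.2.2.2.2⟩
    have hnotin : c ∉ V ∪ new.toFinset := (VRepr_get hrepr hc1 hc2).mp hc.2.2.2.2.1
    have hcV : c ∉ V := fun h => hnotin (Finset.mem_union_left _ h)
    have hcnew : c ∉ new := fun h => hnotin (Finset.mem_union_right _ (List.mem_toFinset.mpr h))
    refine ⟨new ++ [c],
      vis.set p.1.toNat ((vis.getD p.1.toNat []).set p.2.toNat 1), ?_, ⟨?_, ?_, ?_⟩, ?_, ?_⟩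
    · have e2 : (acc ++ new.map castC) ++ [p] = acc ++ (new ++ [c]).map castC := by
        simp [hcast]
      rw [tryNeighbor, if_pos hc]
      exact Prod.ext rfl e2
    · have : V ∪ (new ++ [c]).toFinset = insert c (V ∪ new.toFinset) := by
        ext d
        simp only [Finset.mem_union, List.mem_toFinset, List.mem_append, List.mem_singleton,
          Finset.mem_insert]
        tauto
      rw [this]
      exact VRepr_set hrepr hc1 hc2
    · refine List.Nodup.append hnd (List.nodup_singleton c) ?_
      intro a ha hb
      simp only [List.mem_singleton] at hb
      subst hb
      exact hcnew ha
    · intro d hd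
      rcases List.mem_append.mp hd with h | h
      · exact hprops d h
      · simp at h; subst h; exact ⟨hadj c hcast, hgood, hcV⟩
    · exact ⟨[c], rfl⟩
    · intro d hdp _ _
      have : d = c := castC_inj (hdp.trans hcast.symm)
      simp [this]
  · refine ⟨new, vis, ?_, ⟨hrepr, hnd, hprops⟩, List.prefix_refl _, ?_⟩
    · rw [tryNeighbor, if_neg hc]
    · intro d hdp hdg hdV
      by_contra hdnew
      obtain ⟨hg1, hg2, hg3⟩ := hdg
      apply hc
      have h1 : p.1 = (d.1 : Int) := by rw [← hdp]; rfl
      have h2 : p.2 = (d.2 : Int) := by rw [← hdp]; rfl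
      have ht1 : p.1.toNat = d.1 := by omega
      have ht2 : p.2.toNat = d.2 := by omega
      have hdin : (d.1, d.2) ∉ V ∪ new.toFinset := by
        simp only [Finset.mem_union, List.mem_toFinset]
        rintro (h | h)
        · exact hdV (by simpa using h)
        · exact hdnew (by simpa using h)
      refine ⟨by omega, by omega, by omega, by omega, ?_, ?_⟩
      · rw [ht1, ht2]
        exact (VRepr_get hrepr hg1 hg2).mpr hdin
      · rw [ht1, ht2]
        exact hg3

theorem mem_gridF {n m : Nat} {c : Nat × Nat} : c ∈ gridF n m ↔ c.1 < n ∧ c.2 < m := by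
  simp [gridF, Finset.mem_product]

theorem good_mem_gridF {M : List (List Int)} {n m : Nat} {c : Nat × Nat}
    (h : goodC M n m c) : c ∈ gridF n m := mem_gridF.mpr ⟨h.1, h.2.1⟩

theorem card_shrink {n m : Nat} {V : Finset (Nat × Nat)} {N : List (Nat × Nat)}
    (hnd : N.Nodup) (hg : ∀ c ∈ N, c ∈ gridF n m) (hv : ∀ c ∈ N, c ∉ V) :
    (gridF n m \ (V ∪ N.toFinset)).card + N.length = (gridF n m \ V).card := by
  have h1 : gridF n m \ (V ∪ N.toFinset) = (gridF n m \ V) \ N.toFinset := by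
    ext d
    simp only [Finset.mem_sdiff, Finset.mem_union]
    tauto
  have h2 : N.toFinset ⊆ gridF n m \ V := by
    intro d hd
    rw [List.mem_toFinset] at hd
    exact Finset.mem_sdiff.mpr ⟨hg d hd, hv d hd⟩
  rw [h1, Finset.card_sdiff, Finset.inter_eq_left.mpr h2, List.toFinset_card_of_nodup hnd]
  have := Finset.card_le_card h2
  rw [List.toFinset_card_of_nodup hnd] at this
  omega

theorem comp_subset_S (M : List (List Int)) (n m : Nat) (V0 : Finset (Nat × Nat))
    (start : Nat × Nat) (S : Finset (Nat × Nat)) (hstart : start ∈ S)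
    (hclosed : ∀ u ∈ S, ∀ w, adjC u w → goodC M n m w → w ∈ V0 ∪ S) :
    ∀ d, inComp M n m V0 start d → d ∈ S := by
  intro d hd
  obtain ⟨hg, h0, hr⟩ := hd
  clear hg h0
  induction hr with
  | refl => exact hstart
  | tail h1 h2 ih =>
    obtain ⟨hadj, hgood, h0⟩ := h2
    rcases Finset.mem_union.mp (hclosed _ ih _ hadj hgood) with h | h
    · exact absurd h h0
    · exact h

theorem mem_compF {M : List (List Int)} {n m : Nat} {V0 : Finset (Nat × Nat)}
    {start c : Nat × Nat} :
    c ∈ compF M n m V0 start ↔ c ∈ gridF n m ∧ inComp M n m V0 start c := by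
  unfold compF
  exact @Finset.mem_filter _ _ (fun _ => Classical.propDecidable _) _ _

theorem S_eq_comp (M : List (List Int)) (n m : Nat) (V0 : Finset (Nat × Nat))
    (start : Nat × Nat) (S : Finset (Nat × Nat))
    (hS : ∀ c ∈ S, inComp M n m V0 start c) (hstart : start ∈ S)
    (hclosed : ∀ u ∈ S, ∀ w, adjC u w → goodC M n m w → w ∈ V0 ∪ S) :
    S = compF M n m V0 start := by
  apply Finset.Subset.antisymm
  · intro c hc
    exact mem_compF.mpr ⟨good_mem_gridF (hS c hc).1, hS c hc⟩
  · intro c hc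
    have hic := (mem_compF.mp hc).2
    exact comp_subset_S M n m V0 start S hstart hclosed c hic

-- processing one popped cell in A: the four tries
theorem popA_spec (M : List (List Int)) (n m : Nat) (V : Finset (Nat × Nat)) (u : Nat × Nat)
    (vis : List (List Int)) (rest : List (Int × Int)) (curr : Int)
    (hrepr : VRepr n m vis V) :
    ∃ (new : List (Nat × Nat)) (vis' : List (List Int)),
      (let r1 := tryMovingTo ((u.1 : Int) - 1) (u.2 : Int) n m vis M rest
       let r2 := tryMovingTo ((u.1 : Int) + 1) (u.2 : Int) n m r1.2.1 M r1.2.2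
       let r3 := tryMovingTo (u.1 : Int) ((u.2 : Int) - 1) n m r2.2.1 M r2.2.2
       let r4 := tryMovingTo (u.1 : Int) ((u.2 : Int) + 1) n m r3.2.1 M r3.2.2
       (curr + r1.1 + r2.1 + r3.1 + r4.1, r4.2.1, r4.2.2)) =
        (curr + (new.map (valC M)).sum, vis', (new.reverse.map castC) ++ rest) ∧
      VRepr n m vis' (V ∪ new.toFinset) ∧ new.Nodup ∧
      (∀ c ∈ new, adjC u c ∧ goodC M n m c ∧ c ∉ V) ∧
      (∀ c, adjC u c → goodC M n m c → c ∉ V → c ∈ new) := by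
  have hadj1 : ∀ c : Nat × Nat, castC c = ((u.1 : Int) - 1, (u.2 : Int)) → adjC u c := by
    intro c h
    simp only [castC, Prod.ext_iff] at h
    unfold adjC
    omega
  have hadj2 : ∀ c : Nat × Nat, castC c = ((u.1 : Int) + 1, (u.2 : Int)) → adjC u c := by
    intro c h
    simp only [castC, Prod.ext_iff] at h
    unfold adjC
    omega
  have hadj3 : ∀ c : Nat × Nat, castC c = ((u.1 : Int), (u.2 : Int) - 1) → adjC u c := by
    intro c h
    simp only [castC, Prod.ext_iff] at h
    unfold adjC
    omega
  have hadj4 : ∀ c : Nat × Nat, castC c = ((u.1 : Int), (u.2 : Int) + 1) → adjC u c := by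
    intro c h
    simp only [castC, Prod.ext_iff] at h
    unfold adjC
    omega
  have hinv0 : AccInv M n m V u [] vis := by
    refine ⟨by simpa using hrepr, List.nodup_nil, by simp⟩
  obtain ⟨n1, v1, he1, hi1, hp1, hcm1⟩ :=
    try_acc M n m V u [] vis rest ((u.1 : Int) - 1, (u.2 : Int)) hadj1 hinv0
  obtain ⟨n2, v2, he2, hi2, hp2, hcm2⟩ :=
    try_acc M n m V u n1 v1 rest ((u.1 : Int) + 1, (u.2 : Int)) hadj2 hi1
  obtain ⟨n3, v3, he3, hi3, hp3, hcm3⟩ :=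
    try_acc M n m V u n2 v2 rest ((u.1 : Int), (u.2 : Int) - 1) hadj3 hi2
  obtain ⟨n4, v4, he4, hi4, hp4, hcm4⟩ :=
    try_acc M n m V u n3 v3 rest ((u.1 : Int), (u.2 : Int) + 1) hadj4 hi3
  simp only [List.reverse_nil, List.map_nil, List.nil_append, List.sum_nil, sub_zero] at he1
  obtain ⟨hir4, hnd4, hprops4⟩ := hi4
  refine ⟨n4, v4, ?_, hir4, hnd4, hprops4, ?_⟩
  · dsimp only
    rw [he1, he2, he3, he4]
    dsimp only
    refine Prod.ext ?_ rfl
    dsimp only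
    ring
  · intro c hadj hg hV
    have h14 : n1 <+: n4 := (hp2.trans hp3).trans hp4
    have h24 : n2 <+: n4 := hp3.trans hp4
    have h34 : n3 <+: n4 := hp4
    rcases hadj with ⟨h1, h2 | h2⟩ | ⟨h1, h2 | h2⟩
    · -- u.2 = c.2 + 1 : candidate (u.1, u.2 - 1)
      refine h34.subset (hcm3 c ?_ hg hV)
      simp only [castC, Prod.ext_iff]
      constructor <;> omega
    · -- c.2 = u.2 + 1 : candidate (u.1, u.2 + 1)
      refine hcm4 c ?_ hg hV
      simp only [castC, Prod.ext_iff]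
      constructor <;> omega
    · -- u.1 = c.1 + 1 : candidate (u.1 - 1, u.2)
      refine h14.subset (hcm1 c ?_ hg hV)
      simp only [castC, Prod.ext_iff]
      constructor <;> omega
    · -- c.1 = u.1 + 1 : candidate (u.1 + 1, u.2)
      refine h24.subset (hcm2 c ?_ hg hV)
      simp only [castC, Prod.ext_iff]
      constructor <;> omega

-- processing one frontier cell in B (procCell), same content, frontier appended at the end
theorem procB_spec (M : List (List Int)) (n m : Nat) (V : Finset (Nat × Nat)) (u : Nat × Nat)
    (vis : List (List Int)) (acc : List (Int × Int)) (total : Int)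
    (hrepr : VRepr n m vis V) :
    ∃ (new : List (Nat × Nat)) (vis' : List (List Int)),
      procCell n m M (total, vis, acc) (castC u) =
        (total + valC M u, vis', acc ++ new.map castC) ∧
      VRepr n m vis' (V ∪ new.toFinset) ∧ new.Nodup ∧
      (∀ c ∈ new, adjC u c ∧ goodC M n m c ∧ c ∉ V) ∧
      (∀ c, adjC u c → goodC M n m c → c ∉ V → c ∈ new) := by
  have hadj1 : ∀ c : Nat × Nat, castC c = ((u.1 : Int) - 1, (u.2 : Int)) → adjC u c := by
    intro c h
    simp only [castC, Prod.ext_iff] at h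
    unfold adjC
    omega
  have hadj2 : ∀ c : Nat × Nat, castC c = ((u.1 : Int) + 1, (u.2 : Int)) → adjC u c := by
    intro c h
    simp only [castC, Prod.ext_iff] at h
    unfold adjC
    omega
  have hadj3 : ∀ c : Nat × Nat, castC c = ((u.1 : Int), (u.2 : Int) - 1) → adjC u c := by
    intro c h
    simp only [castC, Prod.ext_iff] at h
    unfold adjC
    omega
  have hadj4 : ∀ c : Nat × Nat, castC c = ((u.1 : Int), (u.2 : Int) + 1) → adjC u c := by
    intro c h
    simp only [castC, Prod.ext_iff] at h
    unfold adjC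
    omega
  have hinv0 : AccInv M n m V u [] vis := by
    refine ⟨by simpa using hrepr, List.nodup_nil, by simp⟩
  obtain ⟨n1, v1, he1, hi1, hp1, hcm1⟩ :=
    tryN_acc M n m V u [] vis acc ((u.1 : Int) - 1, (u.2 : Int)) hadj1 hinv0
  obtain ⟨n2, v2, he2, hi2, hp2, hcm2⟩ :=
    tryN_acc M n m V u n1 v1 acc ((u.1 : Int) + 1, (u.2 : Int)) hadj2 hi1
  obtain ⟨n3, v3, he3, hi3, hp3, hcm3⟩ :=
    tryN_acc M n m V u n2 v2 acc ((u.1 : Int), (u.2 : Int) - 1) hadj3 hi2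
  obtain ⟨n4, v4, he4, hi4, hp4, hcm4⟩ :=
    tryN_acc M n m V u n3 v3 acc ((u.1 : Int), (u.2 : Int) + 1) hadj4 hi3
  simp only [List.map_nil, List.append_nil] at he1
  obtain ⟨hir4, hnd4, hprops4⟩ := hi4
  refine ⟨n4, v4, ?_, hir4, hnd4, hprops4, ?_⟩
  · simp only [procCell, castC, List.foldl_cons, List.foldl_nil]
    rw [he1, he2, he3, he4]
    refine Prod.ext ?_ rfl
    simp [valC]
  · intro c hadj hg hV
    have h14 : n1 <+: n4 := (hp2.trans hp3).trans hp4
    have h24 : n2 <+: n4 := hp3.trans hp4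
    have h34 : n3 <+: n4 := hp4
    rcases hadj with ⟨h1, h2 | h2⟩ | ⟨h1, h2 | h2⟩
    · refine h34.subset (hcm3 c ?_ hg hV)
      simp only [castC, Prod.ext_iff]
      constructor <;> omega
    · refine hcm4 c ?_ hg hV
      simp only [castC, Prod.ext_iff]
      constructor <;> omega
    · refine h14.subset (hcm1 c ?_ hg hV)
      simp only [castC, Prod.ext_iff]
      constructor <;> omega
    · refine h24.subset (hcm2 c ?_ hg hV)
      simp only [castC, Prod.ext_iff]
      constructor <;> omega

-- A's while-loop: from a sound intermediate state it returns the component sum and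
-- a vis-list representing V0 ∪ component
theorem spillLoopA_spec (M : List (List Int)) (n m : Nat) (V0 : Finset (Nat × Nat))
    (start : Nat × Nat) :
    ∀ (fuel : Nat) (qc : List (Nat × Nat)) (vis : List (List Int)) (S : Finset (Nat × Nat))
      (curr : Int),
      5 * ((gridF n m \ (V0 ∪ S)).card) + qc.length + 1 ≤ fuel →
      (∀ c ∈ S, inComp M n m V0 start c) →
      start ∈ S →
      (∀ c ∈ qc, c ∈ S) →
      (∀ u ∈ S, u ∉ qc → ∀ w, adjC u w → goodC M n m w → w ∈ V0 ∪ S) →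
      curr = ∑ c ∈ S, valC M c →
      VRepr n m vis (V0 ∪ S) →
      ∃ visR,
        spillLoop fuel n m M (qc.map castC) vis curr =
          (∑ c ∈ compF M n m V0 start, valC M c, visR) ∧
        VRepr n m visR (V0 ∪ compF M n m V0 start) := by
  intro fuel
  induction fuel with
  | zero =>
    intro qc vis S curr hfuel
    omega
  | succ fuel ih =>
    intro qc vis S curr hfuel hS hstart hq hclosed hcurr hrepr
    cases qc with
    | nil =>
      have hSeq : S = compF M n m V0 start :=
        S_eq_comp M n m V0 start S hS hstart (fun u hu w h1 h2 => hclosed u hu (by simp) w h1 h2)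
      refine ⟨vis, ?_, ?_⟩
      · simp only [List.map_nil, spillLoop]
        rw [hcurr, hSeq]
      · rw [← hSeq]
        exact hrepr
    | cons u rest =>
      have hu : u ∈ S := hq u List.mem_cons_self
      obtain ⟨new, vis', heq, hrepr', hnd, hprops, hcompl⟩ :=
        popA_spec M n m (V0 ∪ S) u vis (rest.map castC) curr hrepr
      have key : spillLoop (fuel + 1) n m M ((u :: rest).map castC) vis curr =
          spillLoop fuel n m M
            ((curr + (new.map (valC M)).sum, vis', (new.reverse.map castC) ++ rest.map castC) : Int × List (List Int) × List (Int × Int)).2.2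
            ((curr + (new.map (valC M)).sum, vis', (new.reverse.map castC) ++ rest.map castC) : Int × List (List Int) × List (Int × Int)).2.1
            ((curr + (new.map (valC M)).sum, vis', (new.reverse.map castC) ++ rest.map castC) : Int × List (List Int) × List (Int × Int)).1 := by
        rw [← heq]
        rfl
      simp only at key
      rw [key]
      have hNgrid : ∀ c ∈ new, c ∈ gridF n m := fun c hc => good_mem_gridF (hprops c hc).2.1
      have hNV : ∀ c ∈ new, c ∉ V0 ∪ S := fun c hc => (hprops c hc).2.2
      have hcard := card_shrink hnd hNgrid hNV
      have hNS : ∀ c ∈ new, c ∉ S := fun c hc h =>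
        (hprops c hc).2.2 (Finset.mem_union_right _ h)
      have hNV0 : ∀ c ∈ new, c ∉ V0 := fun c hc h =>
        (hprops c hc).2.2 (Finset.mem_union_left _ h)
      have hunion : (V0 ∪ S) ∪ new.toFinset = V0 ∪ (S ∪ new.toFinset) := Finset.union_assoc _ _ _
      have hmap : (new.reverse.map castC) ++ rest.map castC = (new.reverse ++ rest).map castC := by
        simp
      rw [hmap]
      simp only [List.length_cons] at hfuel
      apply ih (new.reverse ++ rest) vis' (S ∪ new.toFinset)
      · rw [← hunion]
        simp only [List.length_append, List.length_reverse]
        omega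
      · intro c hc
        rcases Finset.mem_union.mp hc with h | h
        · exact hS c h
        · rw [List.mem_toFinset] at h
          obtain ⟨hadj, hgood, hnV⟩ := hprops c h
          exact ⟨hgood, hNV0 c h, (hS u hu).2.2.tail ⟨hadj, hgood, hNV0 c h⟩⟩
      · exact Finset.mem_union_left _ hstart
      · intro c hc
        rcases List.mem_append.mp hc with h | h
        · exact Finset.mem_union_right _ (List.mem_toFinset.mpr (List.mem_reverse.mp h))
        · exact Finset.mem_union_left _ (hq c (List.mem_cons_of_mem _ h))
      · intro u' hu' hnq w hadj hgood
        rcases Finset.mem_union.mp hu' with h | h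
        · by_cases huu : u' = u
          · subst huu
            by_cases hw : w ∈ V0 ∪ S
            · rcases Finset.mem_union.mp hw with h' | h'
              · exact Finset.mem_union_left _ h'
              · exact Finset.mem_union_right _ (Finset.mem_union_left _ h')
            · have := hcompl w hadj hgood hw
              exact Finset.mem_union_right _
                (Finset.mem_union_right _ (List.mem_toFinset.mpr this))
          · have hnq' : u' ∉ (u :: rest) := by
              intro hmem
              rcases List.mem_cons.mp hmem with h' | h'
              · exact huu h'
              · exact hnq (List.mem_append.mpr (Or.inr h'))
            have := hclosed u' h hnq' w hadj hgood
            rcases Finset.mem_union.mp this with h' | h'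
            · exact Finset.mem_union_left _ h'
            · exact Finset.mem_union_right _ (Finset.mem_union_left _ h')
        · rw [List.mem_toFinset] at h
          exact absurd (List.mem_append.mpr (Or.inl (List.mem_reverse.mpr h))) hnq
      · have hdisj : Disjoint S new.toFinset := by
          rw [Finset.disjoint_right]
          intro c hc
          exact fun hS' => hNS c (List.mem_toFinset.mp hc) hS'
        rw [Finset.sum_union hdisj, List.sum_toFinset _ hnd, hcurr]
      · rw [← hunion]
        exact hrepr'


-- B's level fold over one frontier
theorem levelFoldB_spec (M : List (List Int)) (n m : Nat) (V : Finset (Nat × Nat)) :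
    ∀ (cs : List (Nat × Nat)) (vis : List (List Int))
      (acc : List (Nat × Nat)) (total : Int),
      VRepr n m vis (V ∪ acc.toFinset) →
      acc.Nodup → (∀ c ∈ acc, c ∉ V) →
      ∃ (new : List (Nat × Nat)) (vis' : List (List Int)),
        (cs.map castC).foldl (procCell n m M) (total, vis, acc.map castC) =
          (total + (cs.map (valC M)).sum, vis', (acc ++ new).map castC) ∧
        VRepr n m vis' (V ∪ (acc ++ new).toFinset) ∧ (acc ++ new).Nodup ∧
        (∀ c ∈ new, goodC M n m c ∧ c ∉ V ∧ ∃ u ∈ cs, adjC u c) ∧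
        (∀ u ∈ cs, ∀ w, adjC u w → goodC M n m w → w ∈ V ∪ (acc ++ new).toFinset) := by
  intro cs
  induction cs with
  | nil =>
    intro vis acc total hrepr hnd hv
    refine ⟨[], vis, ?_, by simpa using hrepr, by simpa using hnd, by simp, by simp⟩
    simp
  | cons u cs ih =>
    intro vis acc total hrepr hnd hv
    obtain ⟨nu, vis', heq, hrepr', hndu, hprops, hcompl⟩ :=
      procB_spec M n m (V ∪ acc.toFinset) u vis (acc.map castC) total hrepr
    have hnuacc : ∀ c ∈ nu, c ∉ acc := fun c hc h =>
      (hprops c hc).2.2 (Finset.mem_union_right _ (List.mem_toFinset.mpr h))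
    have hnuV : ∀ c ∈ nu, c ∉ V := fun c hc h =>
      (hprops c hc).2.2 (Finset.mem_union_left _ h)
    have hset : (V ∪ acc.toFinset) ∪ nu.toFinset = V ∪ (acc ++ nu).toFinset := by
      ext d
      simp only [Finset.mem_union, List.mem_toFinset, List.mem_append]
      tauto
    have hnd' : (acc ++ nu).Nodup := by
      refine List.Nodup.append hnd hndu ?_
      intro a ha hb
      exact hnuacc a hb ha
    have hv' : ∀ c ∈ acc ++ nu, c ∉ V := by
      intro c hc
      rcases List.mem_append.mp hc with h | h
      · exact hv c h
      · exact hnuV c h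
    rw [hset] at hrepr'
    obtain ⟨nr, vis'', heq2, hrepr'', hnd'', hprops2, hcompl2⟩ :=
      ih vis' (acc ++ nu) (total + valC M u) hrepr' hnd' hv'
    refine ⟨nu ++ nr, vis'', ?_, ?_, ?_, ?_, ?_⟩
    · simp only [List.map_cons, List.foldl_cons]
      rw [heq]
      have : acc.map castC ++ nu.map castC = (acc ++ nu).map castC := by simp
      rw [this, heq2]
      simp only [List.sum_cons, List.append_assoc, add_assoc]
    · rw [← List.append_assoc]
      exact hrepr''
    · rw [← List.append_assoc]
      exact hnd''
    · intro c hc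
      rcases List.mem_append.mp hc with h | h
      · obtain ⟨hadj, hgood, _⟩ := hprops c h
        exact ⟨hgood, hnuV c h, u, List.mem_cons_self, hadj⟩
      · obtain ⟨hgood, hV, u', hu', hadj⟩ := hprops2 c h
        exact ⟨hgood, hV, u', List.mem_cons_of_mem _ hu', hadj⟩
    · intro u' hu' w hadj hgood
      have hfinal : V ∪ ((acc ++ nu) ++ nr).toFinset = V ∪ (acc ++ (nu ++ nr)).toFinset := by
        rw [List.append_assoc]
      rcases List.mem_cons.mp hu' with h | h
      · subst h
        by_cases hw : w ∈ V ∪ acc.toFinset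
        · rw [← hfinal]
          rcases Finset.mem_union.mp hw with h' | h'
          · exact Finset.mem_union_left _ h'
          · refine Finset.mem_union_right _ ?_
            rw [List.mem_toFinset] at h' ⊢
            exact List.mem_append.mpr (Or.inl (List.mem_append.mpr (Or.inl h')))
        · have := hcompl w hadj hgood hw
          rw [← hfinal]
          refine Finset.mem_union_right _ ?_
          rw [List.mem_toFinset]
          exact List.mem_append.mpr (Or.inl (List.mem_append.mpr (Or.inr this)))
      · rw [← hfinal]
        exact hcompl2 u' h w hadj hgood

-- B's while-loop
theorem levelLoopB_spec (M : List (List Int)) (n m : Nat) (V0 : Finset (Nat × Nat))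
    (start : Nat × Nat) :
    ∀ (fuel : Nat) (fc : List (Nat × Nat)) (vis : List (List Int)) (S : Finset (Nat × Nat))
      (total : Int),
      1 ≤ fuel → (fc ≠ [] → (gridF n m \ (V0 ∪ S)).card + 2 ≤ fuel) →
      (∀ c ∈ S, inComp M n m V0 start c) →
      start ∈ S →
      fc.Nodup → (∀ c ∈ fc, c ∈ S) →
      (∀ u ∈ S, u ∉ fc → ∀ w, adjC u w → goodC M n m w → w ∈ V0 ∪ S) →
      total = ∑ c ∈ S \ fc.toFinset, valC M c →
      VRepr n m vis (V0 ∪ S) →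
      ∃ visR,
        levelLoop fuel n m M (fc.map castC) vis total =
          (∑ c ∈ compF M n m V0 start, valC M c, visR) ∧
        VRepr n m visR (V0 ∪ compF M n m V0 start) := by
  intro fuel
  induction fuel with
  | zero =>
    intro fc vis S total h1
    omega
  | succ fuel ih =>
    intro fc vis S total h1 h2 hS hstart hnd hq hclosed htot hrepr
    cases fc with
    | nil =>
      have hSeq : S = compF M n m V0 start :=
        S_eq_comp M n m V0 start S hS hstart (fun u hu w ha hg => hclosed u hu (by simp) w ha hg)
      refine ⟨vis, ?_, ?_⟩
      · simp only [List.map_nil, levelLoop, List.isEmpty_nil, if_true]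
        rw [htot, hSeq]
        simp
      · rw [← hSeq]
        exact hrepr
    | cons u fc' =>
      obtain ⟨new, vis', heq, hrepr', hnd', hprops, hcompl⟩ :=
        levelFoldB_spec M n m (V0 ∪ S) (u :: fc') vis [] total (by simpa using hrepr)
          List.nodup_nil (by simp)
      simp only [List.nil_append] at heq hrepr' hnd' hcompl
      have hNS : ∀ c ∈ new, c ∉ S := fun c hc h =>
        (hprops c hc).2.1 (Finset.mem_union_right _ h)
      have hNV0 : ∀ c ∈ new, c ∉ V0 := fun c hc h =>
        (hprops c hc).2.1 (Finset.mem_union_left _ h)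
      have hNgrid : ∀ c ∈ new, c ∈ gridF n m := fun c hc => good_mem_gridF (hprops c hc).1
      have hunion : (V0 ∪ S) ∪ new.toFinset = V0 ∪ (S ∪ new.toFinset) := Finset.union_assoc _ _ _
      have hcard := card_shrink hnd' hNgrid (fun c hc => (hprops c hc).2.1)
      have key : levelLoop (fuel + 1) n m M ((u :: fc').map castC) vis total =
          levelLoop fuel n m M
            ((total + ((u :: fc').map (valC M)).sum, vis', new.map castC) :
              Int × List (List Int) × List (Int × Int)).2.2
            ((total + ((u :: fc').map (valC M)).sum, vis', new.map castC) :
              Int × List (List Int) × List (Int × Int)).2.1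
            ((total + ((u :: fc').map (valC M)).sum, vis', new.map castC) :
              Int × List (List Int) × List (Int × Int)).1 := by
        rw [← heq]
        rfl
      simp only at key
      rw [key]
      have hsub : (u :: fc').toFinset ⊆ S := fun c hc => hq c (List.mem_toFinset.mp hc)
      have hsum : total + ((u :: fc').map (valC M)).sum = ∑ c ∈ S, valC M c := by
        rw [htot, ← List.sum_toFinset _ hnd, ← Finset.sum_sdiff hsub]
      rw [hsum]
      apply ih new vis' (S ∪ new.toFinset)
      · have := h2 (by simp)
        omega
      · intro hne
        have hlen : 1 ≤ new.length := by
          cases new with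
          | nil => exact absurd rfl hne
          | cons a l => simp
        have := h2 (by simp)
        rw [← hunion]
        omega
      · intro c hc
        rcases Finset.mem_union.mp hc with h | h
        · exact hS c h
        · rw [List.mem_toFinset] at h
          obtain ⟨hgood, hnV, u', hu', hadj⟩ := hprops c h
          have hu'S : u' ∈ S := hq u' hu'
          exact ⟨hgood, hNV0 c h, (hS u' hu'S).2.2.tail ⟨hadj, hgood, hNV0 c h⟩⟩
      · exact Finset.mem_union_left _ hstart
      · exact hnd'
      · intro c hc
        exact Finset.mem_union_right _ (List.mem_toFinset.mpr hc)
      · intro u' hu' hnq w hadj hgood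
        rw [← hunion]
        rcases Finset.mem_union.mp hu' with h | h
        · by_cases hufc : u' ∈ u :: fc'
          · exact hcompl u' hufc w hadj hgood
          · have := hclosed u' h hufc w hadj hgood
            rcases Finset.mem_union.mp this with h' | h'
            · exact Finset.mem_union_left _ (Finset.mem_union_left _ h')
            · exact Finset.mem_union_left _ (Finset.mem_union_right _ h')
        · exact absurd (List.mem_toFinset.mp h) hnq
      · have : (S ∪ new.toFinset) \ new.toFinset = S := by
          ext c
          simp only [Finset.mem_sdiff, Finset.mem_union, List.mem_toFinset]
          constructor
          · rintro ⟨h' | h', hn⟩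
            · exact h'
            · exact absurd h' hn
          · intro hcS
            exact ⟨Or.inl hcS, fun hn => hNS c hn hcS⟩
        rw [this]
      · rw [← hunion]
        exact hrepr'

-- the two outer folds agree from any common represented state
theorem outer_fold (M : List (List Int)) (n m : Nat) (hn : 0 < n) :
    ∀ (is : List Nat) (vis : List (List Int)) (spills : List (Int × Int))
      (V : Finset (Nat × Nat)),
      (∀ i ∈ is, i < m) → VRepr n m vis V →
      is.foldl (outerStepA n m M) (vis, spills) = is.foldl (outerStepB n m M) (vis, spills) := by
  intro is
  induction is with
  | nil =>
    intro vis spills V hm hrepr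
    rfl
  | cons i is' ih =>
    intro vis spills V hm hrepr
    have him : i < m := hm i List.mem_cons_self
    have hm' : ∀ j ∈ is', j < m := fun j hj => hm j (List.mem_cons_of_mem _ hj)
    simp only [List.foldl_cons]
    by_cases hc : (vis.getD 0 []).getD i 0 = 0 ∧ (M.getD 0 []).getD i 0 ≠ 0
    · have hstart_good : goodC M n m (0, i) := ⟨hn, him, hc.2⟩
      have hs0 : ((0 : Nat), i) ∉ V := (VRepr_get hrepr hn him).mp hc.1
      have hrepr1 : VRepr n m (vis.set 0 ((vis.getD 0 []).set i 1)) (V ∪ {((0 : Nat), i)}) := by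
        have h' := VRepr_set hrepr hn him
        rwa [show insert ((0 : Nat), i) V = V ∪ {((0 : Nat), i)} from by
          ext d
          simp [or_comm]] at h'
      have hgridcard : (gridF n m).card = n * m := by
        simp [gridF]
      have hcardle : (gridF n m \ (V ∪ {((0 : Nat), i)})).card ≤ n * m := by
        rw [← hgridcard]
        exact Finset.card_le_card (Finset.sdiff_subset)
      have hSA : ∀ c ∈ ({((0 : Nat), i)} : Finset (Nat × Nat)), inComp M n m V (0, i) c := by
        intro c hcm
        rw [Finset.mem_singleton] at hcm
        subst hcm
        exact ⟨hstart_good, hs0, Relation.ReflTransGen.refl⟩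
      have hqA : ∀ c ∈ [((0 : Nat), i)], c ∈ ({((0 : Nat), i)} : Finset (Nat × Nat)) := by
        simp
      have hclosA : ∀ u ∈ ({((0 : Nat), i)} : Finset (Nat × Nat)), u ∉ [((0 : Nat), i)] →
          ∀ w, adjC u w → goodC M n m w → w ∈ V ∪ {((0 : Nat), i)} := by
        intro u hu hnu
        rw [Finset.mem_singleton] at hu
        exact absurd (by simp [hu]) hnu
      have hcurrA : (M.getD 0 []).getD i 0 = ∑ c ∈ ({((0 : Nat), i)} : Finset (Nat × Nat)), valC M c := by
        simp [valC]
      obtain ⟨visA, heqA, hreprA⟩ :=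
        spillLoopA_spec M n m V (0, i) (5 * (n * m) + 2) [(0, i)]
          (vis.set 0 ((vis.getD 0 []).set i 1)) {((0 : Nat), i)} ((M.getD 0 []).getD i 0)
          (by simp only [List.length_cons, List.length_nil]; omega)
          hSA (Finset.mem_singleton_self _) hqA hclosA hcurrA hrepr1
      obtain ⟨visB, heqB, hreprB⟩ :=
        levelLoopB_spec M n m V (0, i) (n * m + 2) [(0, i)]
          (vis.set 0 ((vis.getD 0 []).set i 1)) {((0 : Nat), i)} 0
          (by omega) (fun _ => by omega)
          hSA (Finset.mem_singleton_self _) (by simp) hqA hclosA (by simp) hrepr1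
      simp only [List.map_cons, List.map_nil, castC, Nat.cast_zero] at heqA heqB
      have hvisEq : visA = visB := VRepr_ext hreprA hreprB
      have stepA : outerStepA n m M (vis, spills) i =
          (visA, spills ++ [((i : Int), ∑ c ∈ compF M n m V (0, i), valC M c)]) := by
        unfold outerStepA
        dsimp only
        rw [if_pos hc, heqA]
      have stepB : outerStepB n m M (vis, spills) i =
          (visB, spills ++ [((i : Int), ∑ c ∈ compF M n m V (0, i), valC M c)]) := by
        unfold outerStepB
        dsimp only
        rw [if_pos hc, heqB]
      rw [stepA, stepB, hvisEq]
      exact ih visB _ (V ∪ compF M n m V (0, i)) hm' hreprB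
    · have stepA : outerStepA n m M (vis, spills) i = (vis, spills) := by
        unfold outerStepA
        dsimp only
        rw [if_neg hc]
      have stepB : outerStepB n m M (vis, spills) i = (vis, spills) := by
        unfold outerStepB
        dsimp only
        rw [if_neg hc]
      rw [stepA, stepB]
      exact ih vis spills V hm' hrepr

-- ===== VERDICT (by name: the statement is the Claim_ definition above) =====
theorem get_spills_spec : Claim_equal_get_spills := by
  intro M _hdom hpre
  unfold Spec_get_spills get_spills get_spills_alt
  dsimp only
  have hn : 0 < M.length := List.length_pos_iff.mpr hpre.1
  rw [outer_fold M M.length (M.headD []).length hn (List.range (M.headD []).length)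
    ((List.range M.length).map (fun _ => (List.range (M.headD []).length).map (fun _ => (0 : Int))))
    [] ∅ (fun i hi => List.mem_range.mp hi) (VRepr_init _ _)]
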